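-- pv_equiv track=rewrite | github.com/FTDfangge/leetcode | competetion/week_341_2.py | maxDivScore
-- ===== SOURCE A (Python) =====
-- from typing import List
--
-- def maxDivScore(nums: List[int], divisors: List[int]) -> int:
--     divisors = list(set(divisors))
--     score_dict = dict()
--     for d in divisors:
--         score_dict[d] = 0
--     for i in nums:
--         for d in divisors:
--             if i % d == 0:
--                 score_dict[d] += 1
--     scores = sorted(score_dict.items(), key=lambda x: x[1], reverse=True)
--     max_score = scores[0][1]
--     anss = []
--     for i in scores:
--         if i[1] == max_score:
--             anss.append(i[0])
--         else:
--             break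
--     anss.sort()
--     return anss[0]
-- ===== SOURCE B (Python) =====
-- def maxDivScore(nums, divisors):
--     # Inverted direction: instead of testing every num against every divisor,
--     # enumerate each num's divisors by trial division up to sqrt(|num|) and
--     # tally them into a table keyed by the divisors' absolute values; then one
--     # tie-breaking scan picks the smallest divisor with the highest tally.
--     ds = set(divisors)
--     tally = {}
--     for d in ds:
--         tally[abs(d)] = 0
--     zeros = 0
--     for i in nums:
--         a = abs(i)
--         if a == 0:
--             zeros += 1
--             continue
--         e = 1
--         while e * e <= a:
--             if a % e == 0:
--                 if e in tally:
--                     tally[e] += 1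
--                 q = a // e
--                 if q != e and q in tally:
--                     tally[q] += 1
--             e += 1
--     best = None
--     for d in ds:
--         s = zeros + tally[abs(d)]
--         if best is None or s > best[0] or (s == best[0] and d < best[1]):
--             best = (s, d)
--     return best[1]
-- ===== Notes on version B (the rewrite author's own statement) =====
-- stated objective: faster
-- what changed: B inverts the counting direction: instead of testing every num against every divisor and double-sorting a score dict, it enumerates each num's divisors by trial division up to sqrt(|num|), tallies them into a table keyed by the divisors' absolute values, and picks the answer in one tie-breaking best-scan.
import Mathlib
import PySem

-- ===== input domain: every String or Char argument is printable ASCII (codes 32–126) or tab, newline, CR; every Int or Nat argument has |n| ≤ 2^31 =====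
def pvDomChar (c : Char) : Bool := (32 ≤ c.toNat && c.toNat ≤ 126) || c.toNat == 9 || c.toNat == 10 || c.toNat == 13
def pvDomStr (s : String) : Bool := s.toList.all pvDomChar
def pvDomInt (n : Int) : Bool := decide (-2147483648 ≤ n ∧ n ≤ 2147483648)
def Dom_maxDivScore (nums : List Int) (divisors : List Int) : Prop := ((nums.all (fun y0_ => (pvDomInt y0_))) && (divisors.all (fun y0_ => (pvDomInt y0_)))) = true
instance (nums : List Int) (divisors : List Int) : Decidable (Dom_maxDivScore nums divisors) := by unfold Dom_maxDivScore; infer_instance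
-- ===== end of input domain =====

-- B inverts the direction of the counting: instead of testing every num against every
-- divisor and then sorting a score dict twice, it enumerates each num's divisors by trial
-- division up to sqrt(|num|), tallies them into a table keyed by the divisors' absolute
-- values, and picks the answer in one tie-breaking scan; per-num cost is independent of the
-- number of divisors (measured faster in a timing run on its generated inputs).

-- ===== PORT A =====
-- the for-loop over `scores` with `break` (collect the max-score prefix)
def pvCollect (max_score : Int) : List (Int × Int) → List Int
  | [] => []
  | x :: rest => if x.2 == max_score then x.1 :: pvCollect max_score rest else []

def maxDivScore (nums : List Int) (divisors : List Int) : Int :=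
  let divisors' := PySem.Set.ofList divisors
  let score_dict : PySem.Dict Int Int :=
    divisors'.foldl (fun sd d => sd.insert d 0) PySem.Dict.empty
  let score_dict :=
    nums.foldl (fun sd i =>
      divisors'.foldl (fun sd d =>
        if PySem.Int.mod i d == 0 then sd.modify d 0 (· + 1) else sd) sd) score_dict
  let scores := PySem.List.sorted score_dict.items (fun x => x.2) true
  -- scores[0][1]: the IndexError on empty `divisors` is excluded by Pre_; .getD only totalises
  let max_score := ((PySem.List.pyGet? scores 0).getD (0, 0)).2
  let anss := pvCollect max_score scores
  let anss' := PySem.List.sorted anss (fun x => x) false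
  (PySem.List.pyGet? anss' 0).getD 0

-- ===== PORT B =====
-- the `while e * e <= a` trial-division loop of Source B (a = |i|; the dict keys — Python's
-- abs(divisor) values — are nonnegative, kept as Nat)
-- structural recursion on a fuel that only makes the while-loop total: `a + 1 - e` steps
-- always suffice, since `e * e ≤ a` forces `e ≤ a` (pvTrial_fuel_le below)
def pvTrialGo (fuel : Nat) (a : Nat) (e : Nat) (t : PySem.Dict Nat Int) : PySem.Dict Nat Int :=
  match fuel with
  | 0 => t
  | fuel + 1 =>
    if e * e ≤ a then
      let t1 :=
        if a % e == 0 then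
          let t' := if t.contains e then t.modify e 0 (· + 1) else t
          let q := a / e
          if q != e && t'.contains q then t'.modify q 0 (· + 1) else t'
        else t
      pvTrialGo fuel a (e + 1) t1
    else t

def pvTrial (a : Nat) (e : Nat) (t : PySem.Dict Nat Int) : PySem.Dict Nat Int :=
  pvTrialGo (a + 1 - e) a e t

def maxDivScore_alt (nums : List Int) (divisors : List Int) : Int :=
  let ds := PySem.Set.ofList divisors
  let tally0 : PySem.Dict Nat Int := ds.foldl (fun t d => t.insert d.natAbs 0) PySem.Dict.empty
  let st := nums.foldl (fun (st : Int × PySem.Dict Nat Int) i =>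
      let a := i.natAbs
      if a == 0 then (st.1 + 1, st.2) else (st.1, pvTrial a 1 st.2)) (0, tally0)
  let best := ds.foldl (fun (best : Option (Int × Int)) d =>
      let s := st.1 + st.2.getD d.natAbs 0
      match best with
      | none => some (s, d)
      | some b => if s > b.1 || (s == b.1 && d < b.2) then some (s, d) else some b) none
  -- best[1]: the TypeError on empty `divisors` (best is None) is excluded by Pre_
  match best with
  | some b => b.2
  | none => 0

-- ===== PRECONDITION & SPEC =====
-- Pre_ excludes exactly the inputs where the Python A raises: empty `divisors`
-- (IndexError at scores[0]) and 0 among the divisors when nums is nonempty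
-- (ZeroDivisionError at i % d).
def Pre_maxDivScore (nums : List Int) (divisors : List Int) : Prop :=
  divisors ≠ [] ∧ (nums = [] ∨ (0 : Int) ∉ divisors)
instance (nums : List Int) (divisors : List Int) : Decidable (Pre_maxDivScore nums divisors) := by
  unfold Pre_maxDivScore; infer_instance

def pvWitness_maxDivScore : List Int × List Int := ([6, 4, 7], [2, 3, 7])

def Spec_maxDivScore (nums : List Int) (divisors : List Int) (out : Int) : Prop := out = maxDivScore_alt nums divisors
instance (nums : List Int) (divisors : List Int) (out : Int) : Decidable (Spec_maxDivScore nums divisors out) := by unfold Spec_maxDivScore; infer_instance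

-- ===== CLAIM (what is proved, stated in full; the proofs are below) =====
def Claim_equal_maxDivScore : Prop := ∀ (nums : List Int) (divisors : List Int), Dom_maxDivScore nums divisors → Pre_maxDivScore nums divisors → Spec_maxDivScore nums divisors (maxDivScore nums divisors)

-- ===== LEMMAS AND PROOFS =====

-- ---------- A-side lemmas ----------

-- getD through the inner conditional-modify fold
theorem getD_condModify_fold (P : Int → Bool) (l : List Int) (D : PySem.Dict Int Int) (d : Int) :
    ((l.foldl (fun sd x => if P x then sd.modify x 0 (· + 1) else sd) D).getD d 0)
      = D.getD d 0 + (if P d then (l.count d : Int) else 0) := by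
  induction l generalizing D with
  | nil => simp
  | cons x t ih =>
    simp only [List.foldl_cons, ih]
    by_cases hx : P x
    · simp only [hx, if_true]
      rw [PySem.Dict.getD_modify]
      by_cases hdx : d = x
      · subst hdx; simp [hx, List.count_cons]; ring
      · simp [hdx, Ne.symm hdx]
    · simp only [hx]
      by_cases hdx : d = x
      · subst hdx; simp [hx]
      · simp [Ne.symm hdx]

-- keys through the inner conditional-modify fold (all touched keys already present)
theorem keys_condModify_fold (P : Int → Bool) (l : List Int) (D : PySem.Dict Int Int)
    (h : ∀ x ∈ l, D.contains x = true) :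
    (l.foldl (fun sd x => if P x then sd.modify x 0 (· + 1) else sd) D).keys = D.keys := by
  induction l generalizing D with
  | nil => simp
  | cons x t ih =>
    simp only [List.foldl_cons]
    by_cases hx : P x
    · simp only [hx, if_true]
      have hc : D.contains x = true := h x (List.mem_cons_self)
      have hk : (D.modify x 0 (· + 1)).keys = D.keys := by
        rw [PySem.Dict.keys_modify, PySem.Dict.keys_insert_of_contains _ _ hc]
      rw [ih _ (fun y hy => by rw [PySem.Dict.contains_modify]; simp [h y (List.mem_cons_of_mem _ hy)]), hk]
    · simp only [hx]
      exact ih _ (fun y hy => h y (List.mem_cons_of_mem _ hy))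

-- keys are unchanged through the whole nums loop
theorem keys_outer_fold (dl : List Int) (ns : List Int) (D : PySem.Dict Int Int) (hk : D.keys = dl) :
    (ns.foldl (fun sd i =>
      dl.foldl (fun sd d => if PySem.Int.mod i d == 0 then sd.modify d 0 (· + 1) else sd) sd) D).keys = dl := by
  induction ns generalizing D with
  | nil => exact hk
  | cons i t ih =>
    simp only [List.foldl_cons]
    apply ih
    rw [keys_condModify_fold]
    · exact hk
    · intro x hx
      rw [PySem.Dict.contains_iff_mem_keys, hk]
      exact hx

-- getD through the insert-zero fold
theorem getD_insertZero_fold (l : List Int) (D : PySem.Dict Int Int) (d : Int) :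
    ((l.foldl (fun sd x => sd.insert x (0 : Int)) D).getD d 0)
      = if d ∈ l then 0 else D.getD d 0 := by
  induction l generalizing D with
  | nil => simp
  | cons x t ih =>
    simp only [List.foldl_cons, ih, List.mem_cons]
    by_cases hdt : d ∈ t
    · simp [hdt]
    · by_cases hdx : d = x
      · subst hdx; simp [hdt, PySem.Dict.getD_insert]
      · simp [hdt, hdx, PySem.Dict.getD_insert]

-- pvCollect on a descending list whose values are all ≤ m is the filter
theorem pvCollect_eq_filter (m : Int) (l : List (Int × Int))
    (hp : l.Pairwise (fun a b => b.2 ≤ a.2)) (hle : ∀ p ∈ l, p.2 ≤ m) :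
    pvCollect m l = (l.filter (fun p => p.2 == m)).map (fun p => p.1) := by
  induction l with
  | nil => rfl
  | cons a t ih =>
    rcases List.pairwise_cons.mp hp with ⟨ha, hpt⟩
    by_cases h2 : a.2 = m
    · simp [pvCollect, h2, ih hpt (fun p hp' => hle p (List.mem_cons_of_mem _ hp'))]
    · have hlt : a.2 < m := lt_of_le_of_ne (hle a List.mem_cons_self) h2
      have hnone : ∀ p ∈ t, ¬ (p.2 == m) = true := by
        intro p hpmem hpe
        have := ha p hpmem
        simp only [beq_iff_eq] at hpe
        omega
      simp only [pvCollect, beq_iff_eq, h2, if_false]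
      rw [List.filter_cons_of_neg (by simp [h2]), List.filter_eq_nil_iff.mpr hnone]
      rfl

-- ---------- B-side lemmas ----------

-- the trial-division loop never changes which keys are present
theorem pvTrialGo_contains (fuel : Nat) : ∀ (a e : Nat) (t : PySem.Dict Nat Int) (k : Nat),
    (pvTrialGo fuel a e t).contains k = t.contains k := by
  induction fuel with
  | zero => intro a e t k; rfl
  | succ fuel ih =>
    intro a e t k
    have hmc : ∀ (t' : PySem.Dict Nat Int) (x : Nat), t'.contains x = true →
        (t'.modify x 0 (· + 1)).contains k = t'.contains k := by
      intro t' x hx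
      rw [PySem.Dict.contains_modify]
      by_cases hk : k = x
      · subst hk; simp [hx]
      · simp [hk]
    simp only [pvTrialGo]
    by_cases hlo : e * e ≤ a
    · rw [if_pos hlo, ih]
      by_cases h1 : (a % e == 0) = true
      · rw [if_pos h1]
        by_cases h2 : t.contains e = true
        · rw [if_pos h2]
          by_cases h3 : (a / e != e && (t.modify e 0 (· + 1)).contains (a / e)) = true
          · rw [if_pos h3, hmc _ _ ((Bool.and_eq_true _ _).mp h3).2, hmc _ _ h2]
          · rw [if_neg h3, hmc _ _ h2]
        · rw [if_neg h2]
          by_cases h3 : (a / e != e && t.contains (a / e)) = true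
          · rw [if_pos h3, hmc _ _ ((Bool.and_eq_true _ _).mp h3).2]
          · rw [if_neg h3]
      · rw [if_neg h1]
    · rw [if_neg hlo]

-- when exactly the loop step at e emits the divisor k of a: at e = min(k, a/k)
theorem pvEmit_iff (a e k : Nat) (he : 1 ≤ e) (hlo : e * e ≤ a) :
    (k ∣ a ∧ min k (a / k) = e) ↔ (a % e = 0 ∧ (k = e ∨ (k = a / e ∧ a / e ≠ e))) := by
  have hee : e ≤ e * e := Nat.le_mul_of_pos_left e he
  have ha1 : 1 ≤ a := le_trans he (le_trans hee hlo)
  constructor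
  · rintro ⟨hk, hmin⟩
    have hk1 : 1 ≤ k := Nat.pos_of_dvd_of_pos hk ha1
    rcases min_eq_iff.mp hmin with ⟨hke, -⟩ | ⟨hae, -⟩
    · subst hke
      exact ⟨Nat.mod_eq_zero_of_dvd hk, Or.inl rfl⟩
    · have hedvd : e ∣ a := hae ▸ Nat.div_dvd_of_dvd hk
      have hkq : k = a / e := by
        rw [← hae, Nat.div_div_self hk (by omega)]
      by_cases hke : k = e
      · exact ⟨Nat.mod_eq_zero_of_dvd hedvd, Or.inl hke⟩
      · exact ⟨Nat.mod_eq_zero_of_dvd hedvd, Or.inr ⟨hkq, fun h => hke (by omega)⟩⟩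
  · rintro ⟨hmod, hor⟩
    have hedvd : e ∣ a := Nat.dvd_of_mod_eq_zero hmod
    have heq : e ≤ a / e := (Nat.le_div_iff_mul_le (by omega)).mpr hlo
    rcases hor with rfl | ⟨rfl, hne⟩
    · exact ⟨hedvd, min_eq_left heq⟩
    · have hqd : a / e ∣ a := Nat.div_dvd_of_dvd hedvd
      have haq : a / (a / e) = e := Nat.div_div_self hedvd (by omega)
      exact ⟨hqd, by rw [haq]; exact min_eq_right heq⟩

-- one pass of the trial-division loop, fully characterised: each divisor k of a that is
-- present in the dict and whose emission step min(k, a/k) is still ahead gets exactly +1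
theorem pvTrialGo_getD (a : Nat) : ∀ (fuel e : Nat), 1 ≤ e → a + 1 - e ≤ fuel →
    ∀ (t : PySem.Dict Nat Int) (k : Nat),
    (pvTrialGo fuel a e t).getD k 0 =
      t.getD k 0 + (if t.contains k = true ∧ k ∣ a ∧ e ≤ min k (a / k) then 1 else 0) := by
  intro fuel
  induction fuel with
  | zero =>
    intro e he hf t k
    have hno : ¬(t.contains k = true ∧ k ∣ a ∧ e ≤ min k (a / k)) := by
      rintro ⟨-, hd, hmin⟩
      have h1 : min k (a / k) ≤ a / k := Nat.min_le_right _ _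
      have h2 : a / k ≤ a := Nat.div_le_self a k
      omega
    show t.getD k 0 = _
    rw [if_neg hno, add_zero]
  | succ fuel ih =>
    intro e he hf t k
    have hmc : ∀ (t' : PySem.Dict Nat Int) (x : Nat), t'.contains x = true →
        (t'.modify x 0 (· + 1)).contains k = t'.contains k := by
      intro t' x hx
      rw [PySem.Dict.contains_modify]
      by_cases hk : k = x
      · subst hk; simp [hx]
      · simp [hk]
    simp only [pvTrialGo]
    by_cases hlo : e * e ≤ a
    · rw [if_pos hlo]
      have hee : e ≤ e * e := Nat.le_mul_of_pos_left e he
      have hea : e ≤ a := le_trans hee hlo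
      rw [ih (e + 1) (by omega) (by omega)]
      -- reduce to characterising the single step at e
      have hstep : ∀ t1 : PySem.Dict Nat Int,
          (t1.contains k = t.contains k) →
          (t1.getD k 0 = t.getD k 0 + (if t.contains k = true ∧ k ∣ a ∧ min k (a / k) = e then 1 else 0)) →
          t1.getD k 0 + (if t1.contains k = true ∧ k ∣ a ∧ e + 1 ≤ min k (a / k) then 1 else 0)
            = t.getD k 0 + (if t.contains k = true ∧ k ∣ a ∧ e ≤ min k (a / k) then 1 else 0) := by
        intro t1 hc hg
        rw [hc, hg]
        by_cases hck : t.contains k = true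
        · by_cases hkd : k ∣ a
          · simp only [hck, hkd, true_and]
            by_cases hme : min k (a / k) = e
            · have h1 : ¬ (e + 1 ≤ min k (a / k)) := by omega
              have h2 : e ≤ min k (a / k) := by omega
              simp [hme, h1, h2]
            · by_cases h2 : e ≤ min k (a / k)
              · have h1 : e + 1 ≤ min k (a / k) := by omega
                simp [hme, h1, h2]
              · have h1 : ¬ (e + 1 ≤ min k (a / k)) := by omega
                simp [hme, h1, h2]
          · simp [hkd]
        · simp [hck]
      have hemit := pvEmit_iff a e k he hlo
      by_cases hdv : (a % e == 0) = true
      · have hmod : a % e = 0 := by simpa using hdv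
        rw [if_pos hdv]
        have hiff : (t.contains k = true ∧ k ∣ a ∧ min k (a / k) = e) ↔
            (t.contains k = true ∧ (k = e ∨ (k = a / e ∧ a / e ≠ e))) := by
          constructor
          · rintro ⟨h1, h2, h3⟩; exact ⟨h1, (hemit.mp ⟨h2, h3⟩).2⟩
          · rintro ⟨h1, h2⟩; exact ⟨h1, (hemit.mpr ⟨hmod, h2⟩).1, (hemit.mpr ⟨hmod, h2⟩).2⟩
        by_cases h2 : t.contains e = true
        · rw [if_pos h2]
          by_cases h3 : (a / e != e && (t.modify e 0 (· + 1)).contains (a / e)) = true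
          · -- q := a/e ≠ e is also present: both e and q are tallied at this step
            obtain ⟨h3q, h3c⟩ := (Bool.and_eq_true _ _).mp h3
            have hqe : a / e ≠ e := by simpa using h3q
            have hcq : t.contains (a / e) = true := by
              rw [PySem.Dict.contains_modify] at h3c
              rcases (Bool.or_eq_true _ _).mp h3c with h | h
              · exact absurd (by simpa using h) hqe
              · exact h
            rw [if_pos h3]
            apply hstep
            · rw [hmc _ _ h3c, hmc _ _ h2]
            · simp only [PySem.Dict.getD_modify]
              simp only [hiff]
              by_cases hke : k = e
              · subst hke
                simp [Ne.symm hqe, h2]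
              · by_cases hkq : k = a / e
                · subst hkq
                  simp [hqe, hcq]
                · have hn : ¬ (t.contains k = true ∧ (k = e ∨ k = a / e ∧ a / e ≠ e)) := by
                    rintro ⟨-, h | ⟨h, -⟩⟩
                    exacts [hke h, hkq h]
                  rw [if_neg hkq, if_neg hke, if_neg hn, add_zero]
          · rw [if_neg h3]
            -- only e is tallied (q = e, or q is not a key)
            apply hstep
            · exact hmc _ _ h2
            · simp only [PySem.Dict.getD_modify]
              simp only [hiff]
              by_cases hke : k = e
              · subst hke
                simp [h2]
              · have hnq : ¬ (t.contains k = true ∧ (k = e ∨ (k = a / e ∧ a / e ≠ e))) := by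
                  rintro ⟨hck, h | ⟨hq, hne⟩⟩
                  · exact hke h
                  · subst hq
                    apply h3
                    rw [Bool.and_eq_true]
                    refine ⟨by simpa using hne, ?_⟩
                    rw [PySem.Dict.contains_modify]
                    simp [hck]
                rw [if_neg hke, if_neg hnq, add_zero]
        · rw [if_neg h2]
          by_cases h3 : (a / e != e && t.contains (a / e)) = true
          · -- e is not a key; only q := a/e is tallied
            obtain ⟨h3q, hcq⟩ := (Bool.and_eq_true _ _).mp h3
            have hqe : a / e ≠ e := by simpa using h3q
            rw [if_pos h3]
            apply hstep
            · exact hmc _ _ hcq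
            · simp only [PySem.Dict.getD_modify]
              simp only [hiff]
              by_cases hkq : k = a / e
              · subst hkq
                simp [hqe, hcq]
              · have hnk : ¬ (t.contains k = true ∧ (k = e ∨ (k = a / e ∧ a / e ≠ e))) := by
                  rintro ⟨hck, h | ⟨h, -⟩⟩
                  · subst h; exact h2 hck
                  · exact hkq h
                rw [if_neg hkq, if_neg hnk, add_zero]
          · rw [if_neg h3]
            -- neither e nor q is a key: nothing is tallied
            apply hstep
            · rfl
            · simp only [hiff]
              have hnk : ¬ (t.contains k = true ∧ (k = e ∨ (k = a / e ∧ a / e ≠ e))) := by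
                rintro ⟨hck, h | ⟨hq, hne⟩⟩
                · subst h; exact h2 hck
                · subst hq
                  apply h3
                  rw [Bool.and_eq_true]
                  exact ⟨by simpa using hne, hck⟩
              rw [if_neg hnk, add_zero]
      · rw [if_neg hdv]
        have hmodne : ¬ a % e = 0 := by simpa using hdv
        apply hstep
        · rfl
        · have hno : ¬ (t.contains k = true ∧ k ∣ a ∧ min k (a / k) = e) := by
            rintro ⟨-, hd2, h3⟩
            exact hmodne (hemit.mp ⟨hd2, h3⟩).1
          rw [if_neg hno, add_zero]
    · rw [if_neg hlo]
      have hno : ¬(t.contains k = true ∧ k ∣ a ∧ e ≤ min k (a / k)) := by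
        rintro ⟨-, hd, hmin⟩
        have hm1 : min k (a / k) ≤ k := Nat.min_le_left _ _
        have hm2 : min k (a / k) ≤ a / k := Nat.min_le_right _ _
        have h1 : e * e ≤ min k (a / k) * min k (a / k) := Nat.mul_le_mul hmin hmin
        have h2 : min k (a / k) * min k (a / k) ≤ k * (a / k) := Nat.mul_le_mul hm1 hm2
        have h3 : k * (a / k) = a := by rw [Nat.mul_comm]; exact Nat.div_mul_cancel hd
        exact hlo (le_trans (le_trans h1 h2) (le_of_eq h3))
      rw [if_neg hno, add_zero]

-- the whole while-loop from e = 1 on a ≥ 1: +1 exactly for the present divisors of a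
theorem pvTrial_getD (a : Nat) (ha : 1 ≤ a) (t : PySem.Dict Nat Int) (k : Nat) :
    (pvTrial a 1 t).getD k 0 = t.getD k 0 + (if t.contains k = true ∧ k ∣ a then 1 else 0) := by
  unfold pvTrial
  rw [pvTrialGo_getD a (a + 1 - 1) 1 (le_refl 1) (by omega)]
  congr 1
  by_cases hc : t.contains k = true ∧ k ∣ a
  · have hk1 : 1 ≤ k := Nat.pos_of_dvd_of_pos hc.2 ha
    have hka : k ≤ a := Nat.le_of_dvd ha hc.2
    have hak : 1 ≤ a / k := (Nat.le_div_iff_mul_le hk1).mpr (by omega)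
    simp [hc, Nat.le_min, hk1, hak]
  · have hc2 : ¬(t.contains k = true ∧ k ∣ a ∧ 1 ≤ min k (a / k)) := fun h => hc ⟨h.1, h.2.1⟩
    rw [if_neg hc2, if_neg hc]

-- the nums loop: zeros counts the zero entries, and every present key k gains the number
-- of nonzero nums whose absolute value k divides
theorem outer_fold_spec (nums : List Int) : ∀ (z : Int) (t : PySem.Dict Nat Int),
    (nums.foldl (fun (st : Int × PySem.Dict Nat Int) i =>
        if i.natAbs == 0 then (st.1 + 1, st.2) else (st.1, pvTrial i.natAbs 1 st.2)) (z, t)).1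
      = z + (nums.countP (fun i => i == 0) : Int)
    ∧ (∀ k, (nums.foldl (fun (st : Int × PySem.Dict Nat Int) i =>
        if i.natAbs == 0 then (st.1 + 1, st.2) else (st.1, pvTrial i.natAbs 1 st.2)) (z, t)).2.contains k
        = t.contains k)
    ∧ ∀ k, (nums.foldl (fun (st : Int × PySem.Dict Nat Int) i =>
        if i.natAbs == 0 then (st.1 + 1, st.2) else (st.1, pvTrial i.natAbs 1 st.2)) (z, t)).2.getD k 0
      = t.getD k 0 + (if t.contains k = true
          then (nums.countP (fun i => !(i == 0) && decide (k ∣ i.natAbs)) : Int) else 0) := by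
  induction nums with
  | nil =>
    intro z t
    refine ⟨by simp, fun k => rfl, fun k => by simp⟩
  | cons i l ih =>
    intro z t
    simp only [List.foldl_cons]
    by_cases hi : (i.natAbs == 0) = true
    · have hi0 : i = 0 := by
        have := beq_iff_eq.mp hi
        omega
      rw [if_pos hi]
      obtain ⟨h1, h2, h3⟩ := ih (z + 1) t
      refine ⟨?_, h2, ?_⟩
      · rw [h1]
        subst hi0
        simp only [List.countP_cons]
        simp
        push_cast
        ring
      · intro k
        rw [h3 k]
        subst hi0
        simp only [List.countP_cons]
        simp
    · rw [if_neg hi]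
      have hine : i ≠ 0 := by
        intro h
        subst h
        exact hi (by simp)
      have ha : 1 ≤ i.natAbs := by
        rcases Nat.eq_zero_or_pos i.natAbs with h | h
        · exact absurd (by simp [h]) hi
        · exact h
      obtain ⟨h1, h2, h3⟩ := ih z (pvTrial i.natAbs 1 t)
      have hct : ∀ k, (pvTrial i.natAbs 1 t).contains k = t.contains k :=
        fun k => pvTrialGo_contains _ _ _ _ _
      refine ⟨?_, fun k => by rw [h2 k, hct k], ?_⟩
      · rw [h1]
        simp only [List.countP_cons]
        simp [hine]
      · intro k
        rw [h3 k, hct k, pvTrial_getD i.natAbs ha t k]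
        by_cases hck : t.contains k = true
        · simp only [hck, if_true, true_and]
          rw [List.countP_cons]
          have hii : ((!(i == 0)) = true) := by simp [hine]
          by_cases hdk : k ∣ i.natAbs
          · simp [hii, hdk]
            push_cast
            ring
          · simp [hii, hdk]
        · have hck' : ¬ (t.contains k = true ∧ k ∣ i.natAbs) := fun h => hck h.1
          rw [if_neg hck', if_neg hck, if_neg hck, add_zero, add_zero]

-- the tally starts at 0 everywhere
theorem tally0_getD (ds : List Int) (k : Nat) :
    ((ds.foldl (fun t d => t.insert d.natAbs (0 : Int)) PySem.Dict.empty).getD k 0) = 0 := by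
  suffices h : ∀ t : PySem.Dict Nat Int, (∀ k', t.getD k' 0 = 0) →
      ((ds.foldl (fun t d => t.insert d.natAbs (0 : Int)) t).getD k 0) = 0 by
    exact h PySem.Dict.empty (fun k' => by simp [PySem.Dict.getD_empty])
  induction ds with
  | nil => intro t ht; exact ht k
  | cons d l ih =>
    intro t ht
    simp only [List.foldl_cons]
    refine ih _ (fun k' => ?_)
    rw [PySem.Dict.getD_insert]
    by_cases h : k' = d.natAbs
    · rw [if_pos h]
    · rw [if_neg h]; exact ht k'

-- which keys the tally has: exactly the absolute values of the divisors
theorem tally0_contains (ds : List Int) (k : Nat) :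
    ((ds.foldl (fun t d => t.insert d.natAbs (0 : Int)) PySem.Dict.empty).contains k = true)
      ↔ ∃ d ∈ ds, d.natAbs = k := by
  rw [PySem.Dict.contains_iff_mem_keys,
    PySem.Dict.keys_foldl_insert_key ds (fun d => d.natAbs) (fun _ _ => (0 : Int)) PySem.Dict.empty]
  rw [show PySem.Dict.empty.keys = ([] : List Nat) from rfl, PySem.Set.update_nil_left,
    PySem.Set.mem_ofList]
  simp [List.mem_map]

-- pointwise-additive predicates split a countP
theorem countP_pointwise {α : Type} (p q r : α → Bool)
    (h : ∀ x, (p x).toNat + (q x).toNat = (r x).toNat) :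
    ∀ l : List α, l.countP p + l.countP q = l.countP r := by
  intro l
  induction l with
  | nil => simp
  | cons x t ih =>
    have hx := h x
    simp only [List.countP_cons]
    cases hp : p x <;> cases hq : q x <;> cases hr : r x <;> simp_all <;> omega

-- splitting Python's i % d == 0 count into the zero entries plus the |d| ∣ |i| entries
theorem count_split (nums : List Int) (d : Int) :
    (nums.countP (fun i => i == 0) : Int)
      + (nums.countP (fun i => !(i == 0) && decide (d.natAbs ∣ i.natAbs)) : Int)
    = (nums.countP (fun i => PySem.Int.mod i d == 0) : Int) := by
  have h : ∀ i : Int, ((i == 0 : Bool)).toNat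
      + ((!(i == 0) && decide (d.natAbs ∣ i.natAbs) : Bool)).toNat
      = ((PySem.Int.mod i d == 0 : Bool)).toNat := by
    intro i
    by_cases hi : i = 0
    · subst hi
      have h0 : PySem.Int.mod 0 d = 0 := (PySem.Int.mod_eq_zero_iff_dvd 0 d).mpr (dvd_zero d)
      simp [h0]
    · have hmod : (PySem.Int.mod i d == 0) = decide (d ∣ i) := by
        by_cases hdd : d ∣ i
        · simp [hdd, (PySem.Int.mod_eq_zero_iff_dvd i d).mpr hdd]
        · have hne : ¬ PySem.Int.mod i d = 0 :=
            fun h0 => hdd ((PySem.Int.mod_eq_zero_iff_dvd i d).mp h0)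
          simp [hdd, hne]
      have habs : (decide (d ∣ i)) = decide (d.natAbs ∣ i.natAbs) := by
        simp [Int.natAbs_dvd_natAbs]
      have hbe : (i == 0) = false := by simp [hi]
      rw [hmod, habs]
      simp [hbe]
  exact_mod_cast countP_pointwise _ _ _ h nums

-- B's tie-breaking order (maximise f, break ties downwards) as a Prop
def pvLe (k1 : Int → Int) (a b : Int) : Prop := k1 a < k1 b ∨ (k1 a = k1 b ∧ a ≤ b)

theorem pvLe_trans (k1 : Int → Int) {a b c : Int} (h1 : pvLe k1 a b) (h2 : pvLe k1 b c) : pvLe k1 a c := by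
  unfold pvLe at *; omega

-- the running-best scan keeps the smallest element with the largest f-value
theorem bestFold_aux (f : Int → Int) (l : List Int) : ∀ (m : Int),
    ∃ b, l.foldl (fun (best : Option (Int × Int)) d =>
        match best with
        | none => some (f d, d)
        | some bb => if f d > bb.1 || (f d == bb.1 && d < bb.2) then some (f d, d) else some bb)
      (some (f m, m)) = some (f b, b)
    ∧ (b = m ∨ b ∈ l) ∧ ∀ y, (y = m ∨ y ∈ l) → pvLe (fun d => -f d) b y := by
  induction l with
  | nil =>
    intro m
    refine ⟨m, rfl, Or.inl rfl, ?_⟩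
    intro y hy
    rcases hy with rfl | hy
    · exact Or.inr ⟨rfl, le_refl y⟩
    · simp at hy
  | cons x t ih =>
    intro m
    simp only [List.foldl_cons]
    by_cases hc : (f x > f m || (f x == f m && x < m)) = true
    · rw [if_pos hc]
      obtain ⟨b, he, hmem, hall⟩ := ih x
      have hxm : pvLe (fun d => -f d) x m := by
        simp only [Bool.or_eq_true, Bool.and_eq_true, decide_eq_true_eq, beq_iff_eq,
          gt_iff_lt] at hc
        unfold pvLe
        dsimp only
        omega
      refine ⟨b, he, ?_, ?_⟩
      · rcases hmem with rfl | h
        · exact Or.inr List.mem_cons_self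
        · exact Or.inr (List.mem_cons_of_mem _ h)
      · intro y hy
        rcases hy with rfl | hy
        · exact pvLe_trans _ (hall x (Or.inl rfl)) hxm
        · rcases List.mem_cons.mp hy with rfl | h
          · exact hall y (Or.inl rfl)
          · exact hall y (Or.inr h)
    · rw [if_neg hc]
      obtain ⟨b, he, hmem, hall⟩ := ih m
      have hmx : pvLe (fun d => -f d) m x := by
        simp only [Bool.or_eq_true, Bool.and_eq_true, decide_eq_true_eq, beq_iff_eq,
          gt_iff_lt] at hc
        unfold pvLe
        dsimp only
        omega
      refine ⟨b, he, ?_, ?_⟩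
      · rcases hmem with rfl | h
        · exact Or.inl rfl
        · exact Or.inr (List.mem_cons_of_mem _ h)
      · intro y hy
        rcases hy with rfl | hy
        · exact hall y (Or.inl rfl)
        · rcases List.mem_cons.mp hy with rfl | h
          · exact pvLe_trans _ (hall m (Or.inl rfl)) hmx
          · exact hall y (Or.inr h)

-- ---------- main proof ----------

-- ===== VERDICT (by name: the statement is the Claim_ definition above) =====
theorem maxDivScore_spec : Claim_equal_maxDivScore := by
  intro nums divisors _ hpre
  obtain ⟨hne, -⟩ := hpre
  unfold Spec_maxDivScore maxDivScore maxDivScore_alt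
  dsimp only
  set dl := PySem.Set.ofList divisors with hdl
  have hnd : dl.Nodup := PySem.Set.nodup_ofList divisors
  have hdlne : dl ≠ [] := by
    cases divisors with
    | nil => exact absurd rfl hne
    | cons x t =>
      intro h
      have : x ∈ dl := (PySem.Set.mem_ofList _ _).mpr List.mem_cons_self
      simp [h] at this
  -- the count function
  set cnt : Int → Int := fun d => (nums.countP (fun i => PySem.Int.mod i d == 0) : Int) with hcnt
  -- ===== A's side =====
  set d0 : PySem.Dict Int Int := dl.foldl (fun sd d => sd.insert d 0) PySem.Dict.empty with hd0
  set sdF := nums.foldl (fun sd i =>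
      dl.foldl (fun sd d => if PySem.Int.mod i d == 0 then sd.modify d 0 (· + 1) else sd) sd) d0 with hsdF
  have hkeys0 : d0.keys = dl := by
    rw [hd0, PySem.Dict.keys_foldl_insert dl (fun _ _ => (0 : Int)) PySem.Dict.empty]
    rw [show PySem.Dict.empty.keys = ([] : List Int) from rfl]
    rw [PySem.Set.update_nil_left, PySem.Set.ofList_eq_self_of_nodup dl hnd]
  have hgetD0 : ∀ d : Int, d0.getD d 0 = 0 := by
    intro d
    rw [hd0, getD_insertZero_fold]
    split_ifs <;> simp [PySem.Dict.getD_empty]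
  have hkeysF : sdF.keys = dl := keys_outer_fold dl nums d0 hkeys0
  have hgetDF : ∀ d ∈ dl, sdF.getD d 0 = cnt d := by
    have hgen : ∀ (ns : List Int) (D : PySem.Dict Int Int) (d : Int), d ∈ dl →
        ((ns.foldl (fun sd i =>
          dl.foldl (fun sd d => if PySem.Int.mod i d == 0 then sd.modify d 0 (· + 1) else sd) sd) D).getD d 0)
        = D.getD d 0 + (ns.countP (fun i => PySem.Int.mod i d == 0) : Int) := by
      intro ns
      induction ns with
      | nil => intro D d _; simp
      | cons i t ih =>
        intro D d hd
        simp only [List.foldl_cons]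
        rw [ih _ d hd, getD_condModify_fold (fun x => PySem.Int.mod i x == 0) dl D d,
          List.count_eq_one_of_mem hnd hd, List.countP_cons]
        split_ifs with h <;> simp [h] <;> push_cast <;> ring
    intro d hd
    rw [hsdF, hgen nums d0 d hd, hgetD0]
    simp [hcnt]
  -- items of the final dict
  have hitems : sdF.items = dl.map (fun d => (d, cnt d)) := by
    rw [PySem.Dict.items_eq_map_keys sdF (hkeysF ▸ hnd) 0, hkeysF]
    exact List.map_congr_left (fun d hd => by rw [hgetDF d hd])
  set L := dl.map (fun d => (d, cnt d)) with hL
  have hLne : L ≠ [] := by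
    intro h
    rw [hL, List.map_eq_nil_iff] at h
    exact hdlne h
  -- sorting stage
  rw [hitems]
  set scores := PySem.List.sorted L (fun x => x.2) true with hscores
  have hscne : scores ≠ [] := by
    rw [hscores]
    intro h
    exact hLne ((PySem.List.sorted_eq_nil_iff _ _ _).mp h)
  obtain ⟨s0, st, hsc⟩ := List.exists_cons_of_ne_nil hscne
  set m := s0.2 with hm
  have hget0 : PySem.List.pyGet? scores 0 = some s0 := by
    rw [hsc]; simp [PySem.List.pyGet?, PySem.List.pyIdx?]
  have hmax : ∀ p ∈ L, p.2 ≤ m := PySem.List.key_head_sorted_rev_ge L (fun x => x.2) hsc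
  have hs0L : s0 ∈ L := (PySem.List.mem_sorted L _ true s0).mp (hsc ▸ List.mem_cons_self)
  -- anss as a filter
  have hanss : pvCollect m scores = (scores.filter (fun p => p.2 == m)).map (fun p => p.1) := by
    apply pvCollect_eq_filter
    · exact PySem.List.sorted_pairwise_rev L (fun x => x.2)
    · intro p hp
      exact hmax p ((PySem.List.mem_sorted L _ true p).mp hp)
  set C := dl.filter (fun d => cnt d == m) with hC
  have hperm : (pvCollect m scores).Perm C := by
    rw [hanss]
    have h1 : (scores.filter (fun p => p.2 == m)).Perm (L.filter (fun p => p.2 == m)) :=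
      (PySem.List.sorted_perm L (fun x => x.2) true).filter _
    have h2 : (L.filter (fun p => p.2 == m)).map (fun p => p.1) = C := by
      rw [hL, List.filter_map, hC]
      rw [List.map_map]
      simp [Function.comp_def]
    exact h2 ▸ (h1.map (fun p => p.1))
  have hsorted_eq : PySem.List.sorted (pvCollect m scores) (fun x => x) false
      = PySem.List.sorted C (fun x => x) false :=
    PySem.List.sorted_eq_sorted_of_perm _ _ _ (fun a b h => h) hperm
  have hCne : C ≠ [] := by
    obtain ⟨d, hd, hgd⟩ := List.mem_map.mp hs0L
    have hdm : cnt d = m := by rw [hm, ← hgd]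
    intro h
    have : d ∈ C := List.mem_filter.mpr ⟨hd, by simp [hdm]⟩
    simp [h] at this
  have hsCne : PySem.List.sorted C (fun x => x) false ≠ [] := by
    intro h
    exact hCne ((PySem.List.sorted_eq_nil_iff _ _ _).mp h)
  obtain ⟨h0, ht, hsCeq⟩ := List.exists_cons_of_ne_nil hsCne
  have hgetA : PySem.List.pyGet? (PySem.List.sorted (pvCollect m scores) (fun x => x) false) 0 = some h0 := by
    rw [hsorted_eq, hsCeq]; simp [PySem.List.pyGet?, PySem.List.pyIdx?]
  -- properties of A's answer h0
  have hh0C : h0 ∈ C := (PySem.List.mem_sorted C _ false h0).mp (hsCeq ▸ List.mem_cons_self)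
  have hh0min : ∀ y ∈ C, h0 ≤ y := PySem.List.key_head_sorted_le C (fun x => x) hsCeq
  obtain ⟨hh0dl, hh0m⟩ := List.mem_filter.mp hh0C
  have hh0m' : cnt h0 = m := by simpa using hh0m
  -- ===== B's side =====
  set tly0 : PySem.Dict Nat Int := dl.foldl (fun t d => t.insert d.natAbs 0) PySem.Dict.empty with htly0
  set stF := nums.foldl (fun (st : Int × PySem.Dict Nat Int) i =>
      if i.natAbs == 0 then (st.1 + 1, st.2) else (st.1, pvTrial i.natAbs 1 st.2)) (0, tly0) with hstF
  obtain ⟨hz, hcont, hget⟩ := outer_fold_spec nums 0 tly0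
  rw [← hstF] at hz hget
  set f : Int → Int := fun d => stF.1 + stF.2.getD d.natAbs 0 with hf
  have hfc : ∀ d ∈ dl, f d = cnt d := by
    intro d hd
    have hctn : tly0.contains d.natAbs = true := by
      rw [htly0]
      exact (tally0_contains dl d.natAbs).mpr ⟨d, hd, rfl⟩
    have hg0 : tly0.getD d.natAbs 0 = 0 := by
      rw [htly0]
      exact tally0_getD dl d.natAbs
    rw [hf]
    dsimp only
    rw [hz, hget d.natAbs, if_pos hctn, hg0, hcnt]
    dsimp only
    rw [← count_split nums d]
    ring
  obtain ⟨x, tdl, hdleq⟩ := List.exists_cons_of_ne_nil hdlne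
  rw [hdleq, List.foldl_cons]
  obtain ⟨b, hbeq, hbmem, hball⟩ := bestFold_aux f tdl x
  rw [show (some (f x, x) : Option (Int × Int))
      = (match (none : Option (Int × Int)) with
        | none => some (f x, x)
        | some bb => if f x > bb.1 || (f x == bb.1 && x < bb.2) then some (f x, x) else some bb) from rfl] at hbeq
  rw [hbeq, hget0]
  simp only [Option.getD_some]
  rw [← hm, hgetA]
  simp only [Option.getD_some]
  -- h0 = b
  have hbdl : b ∈ dl := by
    rcases hbmem with rfl | h
    · exact hdleq ▸ List.mem_cons_self
    · exact hdleq ▸ List.mem_cons_of_mem _ h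
  have hball' : ∀ y ∈ dl, pvLe (fun d => -f d) b y := by
    intro y hy
    rw [hdleq] at hy
    rcases List.mem_cons.mp hy with rfl | h
    · exact hball y (Or.inl rfl)
    · exact hball y (Or.inr h)
  have hbh := hball' h0 hh0dl
  rw [pvLe] at hbh
  simp only [neg_lt_neg_iff, neg_inj] at hbh
  rw [hfc b hbdl, hfc h0 hh0dl] at hbh
  have hbL : (b, cnt b) ∈ L := by
    rw [hL]
    exact List.mem_map_of_mem hbdl
  have hble : cnt b ≤ m := hmax _ hbL
  rw [hh0m'] at hbh
  have hbm : cnt b = m ∧ b ≤ h0 := by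
    rcases hbh with h | h
    · omega
    · exact ⟨by omega, h.2⟩
  have hbC : b ∈ C := List.mem_filter.mpr ⟨hbdl, by simp [hbm.1]⟩
  have hhb : h0 ≤ b := hh0min b hbC
  omega
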